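-- pv_equiv track=rewrite | github.com/EugeneShershen/aqa_hillel_1308 | lesson_18/src/generators.py | even_numbers_generator
-- ===== SOURCE A (Python) =====
-- def even_numbers_generator(finite_num):
--     """ Returns every even number up to the finite number.
--     :param finite_num: a finite number
--     """
--     if isinstance(finite_num, int) is not True:
--         raise TypeError("The finite number must be integer")
--
--     if finite_num <= 0:
--         raise ValueError("The finite number must be greater than 0")
--
--     current_num = 0
--     while current_num < finite_num:
--         if current_num % 2 == 0:
--             yield current_num
--
--         current_num += 1
-- ===== SOURCE B (Python) =====
-- def even_numbers_generator(finite_num):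
--     """ Returns every even number up to the finite number.
--     :param finite_num: a finite number
--     """
--     if isinstance(finite_num, int) is not True:
--         raise TypeError("The finite number must be integer")
--
--     if finite_num <= 0:
--         raise ValueError("The finite number must be greater than 0")
--
--     yield from range(0, finite_num, 2)
-- ===== Notes on version B (the rewrite author's own statement) =====
-- stated objective: idiomatic
-- what changed: Replaces the counter loop that scans every integer and tests parity with a single step-2 range that enumerates only the even numbers; guards are unchanged.
import Mathlib
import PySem

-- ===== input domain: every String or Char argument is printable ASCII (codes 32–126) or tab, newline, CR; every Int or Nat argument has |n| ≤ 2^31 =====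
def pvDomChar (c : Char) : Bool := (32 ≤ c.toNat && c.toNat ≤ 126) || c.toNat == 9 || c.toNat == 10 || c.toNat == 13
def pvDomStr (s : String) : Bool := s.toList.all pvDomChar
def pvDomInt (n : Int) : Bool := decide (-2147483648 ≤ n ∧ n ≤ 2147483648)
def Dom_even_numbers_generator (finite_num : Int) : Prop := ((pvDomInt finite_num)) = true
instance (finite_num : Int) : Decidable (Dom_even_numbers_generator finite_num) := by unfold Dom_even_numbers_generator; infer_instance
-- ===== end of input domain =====

-- B replaces A's counter loop with parity test by a single step-2 range (more idiomatic); guards unchanged.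

-- ===== PORT A =====
-- the while loop: current_num counts up by 1, yielding each even value
def evenLoopA (finite_num current_num : Int) : List Int :=
  if _h : current_num < finite_num then
    (if PySem.Int.mod current_num 2 = 0 then [current_num] else [])
      ++ evenLoopA finite_num (current_num + 1)
  else []
termination_by (finite_num - current_num).toNat
decreasing_by omega

def even_numbers_generator (finite_num : Int) : List Int :=
  -- the two guards raise (TypeError is unreachable for an Int argument; ValueError iff finite_num ≤ 0): excluded by Pre_
  evenLoopA finite_num 0

-- ===== PORT B =====
def even_numbers_generator_alt (finite_num : Int) : List Int :=
  -- yield from range(0, finite_num, 2); same guards, excluded by Pre_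
  PySem.List.pyRange 0 finite_num 2

-- ===== PRECONDITION & SPEC =====
-- Pre_ excludes exactly the inputs on which A raises ValueError (finite_num ≤ 0); B raises there too.
def Pre_even_numbers_generator (finite_num : Int) : Prop := 0 < finite_num
instance (finite_num : Int) : Decidable (Pre_even_numbers_generator finite_num) := by unfold Pre_even_numbers_generator; infer_instance
def pvWitness_even_numbers_generator : Int := 7

def Spec_even_numbers_generator (finite_num : Int) (out : List Int) : Prop := out = even_numbers_generator_alt finite_num
instance (finite_num : Int) (out : List Int) : Decidable (Spec_even_numbers_generator finite_num out) := by unfold Spec_even_numbers_generator; infer_instance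

-- ===== CLAIM =====
def Claim_equal_even_numbers_generator : Prop := ∀ (finite_num : Int), Dom_even_numbers_generator finite_num → Pre_even_numbers_generator finite_num → Spec_even_numbers_generator finite_num (even_numbers_generator finite_num)

-- ===== LEMMAS AND PROOFS =====
theorem pyRange_two_nil (c n : Int) (h : n ≤ c) : PySem.List.pyRange c n 2 = [] := by
  rw [PySem.List.pyRange_of_pos _ _ (by norm_num)]
  rw [if_neg (by omega)]
  simp

theorem pyRange_two_cons (c n : Int) (h : c < n) :
    PySem.List.pyRange c n 2 = c :: PySem.List.pyRange (c + 2) n 2 := by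
  rw [PySem.List.pyRange_of_pos _ _ (by norm_num), PySem.List.pyRange_of_pos _ _ (by norm_num)]
  have h2 : ((n - c + 2 - 1) / 2).toNat
      = (if c + 2 < n then ((n - (c + 2) + 2 - 1) / 2).toNat else 0) + 1 := by
    split_ifs <;> omega
  rw [if_pos h, h2, List.range_succ_eq_map]
  simp [List.map_map, Function.comp_def]
  intro a _
  ring

theorem mod_pysem (c : Int) : PySem.Int.mod c 2 = c % 2 := by
  simp [PySem.Int.mod, Int.fmod_eq_emod]

theorem evenLoopA_eq (n : Int) : ∀ (k : Nat) (c : Int), (n - c).toNat ≤ k →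
    evenLoopA n c = if c % 2 = 0 then PySem.List.pyRange c n 2
                    else PySem.List.pyRange (c + 1) n 2 := by
  intro k
  induction k with
  | zero =>
      intro c hc
      have hnc : ¬ c < n := by omega
      rw [evenLoopA, dif_neg hnc]
      split_ifs
      · rw [pyRange_two_nil _ _ (by omega)]
      · rw [pyRange_two_nil _ _ (by omega)]
  | succ k ih =>
      intro c hc
      by_cases hlt : c < n
      · rw [evenLoopA, dif_pos hlt, ih (c + 1) (by omega), mod_pysem]
        have hpar : c % 2 = 0 ∨ c % 2 = 1 := by omega
        rcases hpar with h0 | h1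
        · rw [if_pos h0, if_pos h0,
             if_neg (show ¬ (c + 1) % 2 = 0 by omega),
             pyRange_two_cons _ _ hlt,
             show c + 1 + 1 = c + 2 by ring]
          simp
        · rw [if_neg (show ¬ c % 2 = 0 by omega),
             if_neg (show ¬ c % 2 = 0 by omega),
             if_pos (show (c + 1) % 2 = 0 by omega)]
          simp
      · rw [evenLoopA, dif_neg hlt]
        split_ifs
        · rw [pyRange_two_nil _ _ (by omega)]
        · rw [pyRange_two_nil _ _ (by omega)]

-- ===== VERDICT =====
theorem even_numbers_generator_spec : Claim_equal_even_numbers_generator := by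
  intro n _ _
  unfold Spec_even_numbers_generator even_numbers_generator even_numbers_generator_alt
  rw [evenLoopA_eq n (n - 0).toNat 0 (by omega)]
  norm_num
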